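-- pv_equiv track=rewrite | github.com/pypi-data/pypi-mirror-256 | packages/convergence-service-lib/convergence-service-lib-1.0.10.tar.gz/convergence-service-lib-1.0.10/convergence/convergence_service.py | __match_url_to_endpoint
-- ===== SOURCE A (Python) =====
-- def __match_url_to_endpoint(url, ep_url):
--     if url == ep_url:
--         return True
--
--     comps_url = url.split('/')
--     comps_ep_url = ep_url.split('/')
--
--     if len(comps_url) == len(comps_ep_url):
--         for a, b in zip(comps_url, comps_ep_url):
--             if (b.startswith('{') and b.endswith('}')) or a == b:
--                 continue
--             return False
--
--         return True
--     else:
--         return False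
-- ===== SOURCE B (Python) =====
-- def __match_url_to_endpoint(url, ep_url):
--     # Consume the two segment lists in lockstep from the front: a template
--     # segment of the form {param} matches any url segment, anything else must
--     # match literally; leftover segments on either side make the match fail.
--     us = url.split('/')
--     ts = ep_url.split('/')
--     while us and ts:
--         u = us.pop(0)
--         t = ts.pop(0)
--         if u != t and not (t.startswith('{') and t.endswith('}')):
--             return False
--     return us == ts
-- ===== Notes on version B (the rewrite author's own statement) =====
-- stated objective: simpler
-- what changed: Replaces the equality shortcut, explicit length comparison and for-loop over zip by one front-consuming lockstep loop over the two segment lists whose leftover-segments base case handles uneven lengths.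
import Mathlib
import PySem

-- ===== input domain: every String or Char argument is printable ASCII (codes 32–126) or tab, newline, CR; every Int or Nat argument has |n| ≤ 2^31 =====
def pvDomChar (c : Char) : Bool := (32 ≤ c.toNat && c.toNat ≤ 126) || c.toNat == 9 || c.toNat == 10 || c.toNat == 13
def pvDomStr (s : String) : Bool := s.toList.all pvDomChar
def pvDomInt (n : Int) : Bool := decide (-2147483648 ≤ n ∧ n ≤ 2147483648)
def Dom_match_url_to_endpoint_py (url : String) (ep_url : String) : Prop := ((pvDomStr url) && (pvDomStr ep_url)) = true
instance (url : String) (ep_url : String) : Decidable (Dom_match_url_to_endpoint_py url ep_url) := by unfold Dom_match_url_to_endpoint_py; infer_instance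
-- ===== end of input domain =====

-- B replaces A's equality shortcut, length check and zip loop by one front-consuming
-- lockstep loop over the two segment lists (objective: simpler).

-- ===== PORT A =====
-- the for-loop over zip(comps_url, comps_ep_url) with continue / return False
def pvLoopA : List (String × String) → Bool
  | [] => true
  | (a, b) :: rest =>
    if (PySem.Str.startswith b "{" && PySem.Str.endswith b "}") || a == b then pvLoopA rest
    else false

def match_url_to_endpoint_py (url : String) (ep_url : String) : Bool :=
  if url == ep_url then true
  else
    let comps_url := (PySem.Str.split? url "/").getD []
    let comps_ep_url := (PySem.Str.split? ep_url "/").getD []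
    if comps_url.length == comps_ep_url.length then
      pvLoopA (comps_url.zip comps_ep_url)
    else false

-- ===== PORT B =====
-- the front-consuming while loop: 'while us and ts: … ; return us == ts'
def pvGoB : List String → List String → Bool
  | [], ts => [] == ts
  | us, [] => us == ([] : List String)
  | u :: us, t :: ts =>
    (u == t || (PySem.Str.startswith t "{" && PySem.Str.endswith t "}")) && pvGoB us ts

def match_url_to_endpoint_py_alt (url : String) (ep_url : String) : Bool :=
  pvGoB ((PySem.Str.split? url "/").getD []) ((PySem.Str.split? ep_url "/").getD [])

-- ===== PRECONDITION & SPEC =====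
def Spec_match_url_to_endpoint_py (url : String) (ep_url : String) (out : Bool) : Prop := out = match_url_to_endpoint_py_alt url ep_url
instance (url : String) (ep_url : String) (out : Bool) : Decidable (Spec_match_url_to_endpoint_py url ep_url out) := by unfold Spec_match_url_to_endpoint_py; infer_instance

-- ===== CLAIM (what is proved, stated in full; the proofs are below) =====
def Claim_equal_match_url_to_endpoint_py : Prop := ∀ (url : String) (ep_url : String), Dom_match_url_to_endpoint_py url ep_url → Spec_match_url_to_endpoint_py url ep_url (match_url_to_endpoint_py url ep_url)

-- ===== LEMMAS AND PROOFS =====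

theorem pvGoB_refl (l : List String) : pvGoB l l = true := by
  induction l with
  | nil => rfl
  | cons x xs ih => simp [pvGoB, ih]

theorem pvGoB_eq_loopA (us ts : List String) :
    pvGoB us ts = ((us.length == ts.length) && pvLoopA (us.zip ts)) := by
  induction us generalizing ts with
  | nil => cases ts <;> simp [pvGoB, pvLoopA]
  | cons u us ih =>
    cases ts with
    | nil => simp [pvGoB, pvLoopA]
    | cons t ts =>
      simp only [pvGoB, pvLoopA, ih, List.zip_cons_cons, List.length_cons]
      cases hw : (PySem.Str.startswith t "{" && PySem.Str.endswith t "}") <;>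
        cases he : (u == t) <;> simp

-- ===== VERDICT (by name: the statement is the Claim_ definition above) =====
theorem match_url_to_endpoint_py_spec : Claim_equal_match_url_to_endpoint_py := by
  intro url ep_url _
  unfold Spec_match_url_to_endpoint_py match_url_to_endpoint_py match_url_to_endpoint_py_alt
  by_cases h : url = ep_url
  · subst h
    simp [pvGoB_refl]
  · simp only [beq_iff_eq, h, if_false]
    rw [pvGoB_eq_loopA]
    by_cases hl : ((PySem.Str.split? url "/").getD []).length = ((PySem.Str.split? ep_url "/").getD []).length <;>
      simp [hl]
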